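-- pv_equiv track=rewrite | github.com/lmiksch/CoFPT | functions/nussinov.py | convert
-- ===== SOURCE A (Python) =====
-- def convert(string):
-- 	"""converts string in star annotation to UL_seq and keeps the spaces
--
--
-- 	"""
-- 	counts = string.count("*")
-- 	c_string = list(string)
--
-- 	for x in range(1,len(c_string)):
-- 		if string[x] == "*":
-- 			c_string[x-1] = c_string[x-1].upper()
-- 	for x in range(counts):
-- 		c_string.remove("*")
--
-- 	c_string = "".join(c_string)
-- 	return c_string
-- ===== SOURCE B (Python) =====
-- def convert(string):
--     segs = string.split("*")
--     parts = []
--     for seg in segs[:-1]: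
--         parts.append(seg[:-1] + seg[-1].upper() if seg else seg)
--     parts.append(segs[-1])
--     return "".join(parts)
-- ===== Notes on version B (the rewrite author's own statement) =====
-- stated objective: faster
-- what changed: B splits the string on '*' and uppercases the last character of every non-empty segment except the final one, instead of A's index loop that mutates a char list in place and then calls list.remove('*') once per star.
import Mathlib
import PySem

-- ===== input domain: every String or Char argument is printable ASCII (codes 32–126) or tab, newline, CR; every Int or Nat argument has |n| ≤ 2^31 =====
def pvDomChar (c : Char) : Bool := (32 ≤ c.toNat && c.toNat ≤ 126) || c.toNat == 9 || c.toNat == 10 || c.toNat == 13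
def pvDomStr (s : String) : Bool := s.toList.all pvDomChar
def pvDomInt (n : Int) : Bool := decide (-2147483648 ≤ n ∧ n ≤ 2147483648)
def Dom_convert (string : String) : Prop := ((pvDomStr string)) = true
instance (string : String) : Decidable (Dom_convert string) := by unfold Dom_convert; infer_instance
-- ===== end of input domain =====

-- B differs by decomposition: split on '*' and uppercase each non-final segment's last char,
-- instead of A's in-place index loop followed by repeated list.remove("*") calls (idiomatic rewrite).

-- ===== PORT A =====
-- one step of A's first loop: `if string[x] == "*": c_string[x-1] = c_string[x-1].upper()`
-- (string[x] is read on the char list: Str.pyGet? s x = List.pyGet? s.toList x)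
def convertStep (s : List Char) (acc : List Char) (x : Int) : List Char :=
  if PySem.List.pyGet? s x = some '*' then
    match PySem.List.pyGet? acc (x - 1) with
    | some ch => PySem.List.pySetD acc (x - 1) (PySem.Chars.upperChar ch)
    | none => acc          -- unreachable: x - 1 is always in range for x in range(1, len)
  else acc

def convert (string : String) : String :=
  let counts : Nat := PySem.Str.count string "*"
  let c0 : List Char := string.toList
  -- for x in range(1, len(c_string)): …
  let c1 := (PySem.List.pyRange 1 (c0.length : Int) 1).foldl (convertStep string.toList) c0
  -- for x in range(counts): c_string.remove("*")   (remove never raises: counts stars are present)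
  let c2 := (PySem.List.pyRange 0 (counts : Int) 1).foldl
      (fun acc _ => (PySem.List.remove? acc '*').getD acc) c1
  String.ofList c2

-- ===== PORT B =====
-- port of str.split(sep) for a one-character separator (Python keeps empty pieces)
def pySplitChar (sep : Char) : List Char → List (List Char)
  | [] => [[]]
  | c :: t =>
    match pySplitChar sep t with
    | [] => [[]]           -- unreachable: the split of any list is non-empty
    | s :: rest => if c = sep then [] :: s :: rest else (c :: s) :: rest

-- `seg[:-1] + seg[-1].upper() if seg else seg`
def procSeg (seg : List Char) : List Char :=
  match seg.getLast? with
  | none => seg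
  | some c => seg.dropLast ++ [PySem.Chars.upperChar c]

-- the loop over segs[:-1] (processed) followed by the final segment unchanged, joined by ""
def joinSegs : List (List Char) → List Char
  | [] => []
  | [s] => s
  | s :: rest => procSeg s ++ joinSegs rest

def convert_alt (string : String) : String :=
  String.ofList (joinSegs (pySplitChar '*' string.toList))

-- ===== PRECONDITION & SPEC =====
def Spec_convert (string : String) (out : String) : Prop := out = convert_alt string
instance (string : String) (out : String) : Decidable (Spec_convert string out) := by unfold Spec_convert; infer_instance

-- ===== CLAIM (what is proved, stated in full; the proofs are below) =====
def Claim_equal_convert : Prop := ∀ (string : String), Dom_convert string → Spec_convert string (convert string)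

-- ===== LEMMAS AND PROOFS =====

theorem upperChar_star : PySem.Chars.upperChar '*' = '*' := by decide

theorem upperChar_ne_star {c : Char} (h : c ≠ '*') : PySem.Chars.upperChar c ≠ '*' := by
  unfold PySem.Chars.upperChar PySem.Chars.islower
  split
  · rename_i hc
    simp only [Bool.and_eq_true, decide_eq_true_eq, Char.le_def, UInt32.le_iff_toNat_le] at hc
    have hb : 97 ≤ c.toNat ∧ c.toNat ≤ 122 := by
      simp only [Char.toNat]; exact hc
    intro he
    have h2 : (Char.ofNat (c.toNat - 32)).toNat = ('*').toNat := by rw [he]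
    have h3 : ('*').toNat = 42 := rfl
    rw [Char.toNat_ofNat, if_pos (by constructor; omega)] at h2
    omega
  · exact h

-- `s.count("*")` counts exactly the '*' characters
theorem countGo_singleton (v : Char) :
    ∀ (l : List Char) (fuel acc : Nat), l.length ≤ fuel →
      PySem.Chars.count.go [v] fuel l acc = acc + l.count v := by
  intro l
  induction l with
  | nil => intro fuel acc _; cases fuel <;> simp [PySem.Chars.count.go.eq_def]
  | cons h t ih =>
    intro fuel acc hf
    cases fuel with
    | zero => simp at hf
    | succ f =>
      rw [PySem.Chars.count.go.eq_def]
      dsimp only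
      simp only [List.length_cons, Nat.add_le_add_iff_right] at hf
      by_cases hv : v = h
      · subst hv
        rw [if_pos (by simp [List.isPrefixOf])]
        simp only [List.length_cons, List.length_nil, List.drop_succ_cons, List.drop_zero]
        rw [ih f (acc + 1) hf, List.count_cons_self]
        omega
      · rw [if_neg (by simp [List.isPrefixOf]; intro he; exact absurd he hv)]
        rw [ih f acc hf, List.count_cons_of_ne (fun he => hv he.symm)]

theorem count_star_eq (s : String) :
    PySem.Str.count s "*" = s.toList.count '*' := by
  rw [PySem.Str.count_eq]
  show PySem.Chars.count s.toList ['*'] = _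
  unfold PySem.Chars.count
  rw [if_neg (by simp)]
  simpa using countGo_singleton '*' s.toList s.toList.length 0 le_rfl

-- the common middle form: every char whose successor is '*' uppercased (stars stay: upperChar '*' = '*')
def markIdx (l : List Char) : List Char :=
  l.mapIdx (fun i c => if l[i + 1]? = some '*' then PySem.Chars.upperChar c else c)

-- the first loop of A carried out up to bound n
def markPre (n : Nat) (l : List Char) : List Char :=
  l.mapIdx (fun i c => if i + 1 < n ∧ l[i + 1]? = some '*' then PySem.Chars.upperChar c else c)

theorem mapIdx_eq_self {α : Type} (l : List α) : List.mapIdx (fun _ c => c) l = l := by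
  apply List.ext_getElem <;> simp

theorem mapIdx_congr' {α β : Type} (f g : Nat → α → β) (l : List α)
    (h : ∀ (i : Nat) (hi : i < l.length), f i l[i] = g i l[i]) :
    List.mapIdx f l = List.mapIdx g l := by
  apply List.ext_getElem <;> simp_all

theorem markPre_zero (l : List Char) : markPre 0 l = l := by
  unfold markPre; simp [mapIdx_eq_self]

theorem markPre_one (l : List Char) : markPre 1 l = l := by
  unfold markPre; simp [mapIdx_eq_self]

theorem markPre_length (l : List Char) : markPre l.length l = markIdx l := by
  unfold markPre markIdx
  apply mapIdx_congr'
  intro i hi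
  by_cases hc : l[i + 1]? = some '*'
  · have : i + 1 < l.length := by
      by_contra hn
      rw [List.getElem?_eq_none (by omega)] at hc; simp at hc
    simp [this]
  · simp [hc]

-- A's first loop computes markPre
theorem fold1_eq_markPre (l : List Char) :
    ∀ (n : Nat), n ≤ l.length →
      (PySem.List.pyRange 1 (n : Int) 1).foldl (convertStep l) l = markPre n l := by
  intro n
  induction n with
  | zero =>
    intro _
    rw [PySem.List.pyRange_one_eq_nil (by norm_num), List.foldl_nil, markPre_zero]
  | succ m ih =>
    intro hm
    rcases Nat.eq_zero_or_pos m with hm0 | hmpos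
    · subst hm0
      rw [show ((0 + 1 : Nat) : Int) = 1 by norm_num,
        PySem.List.pyRange_one_eq_nil le_rfl, List.foldl_nil, markPre_one]
    · have hcast : ((m + 1 : Nat) : Int) = (m : Int) + 1 := by push_cast; ring
      rw [hcast, PySem.List.pyRange_one_succ_right (by exact_mod_cast hmpos),
        List.foldl_append, List.foldl_cons, List.foldl_nil, ih (by omega)]
      unfold convertStep
      have hlen : (markPre m l).length = l.length := by unfold markPre; simp
      by_cases hstar : l[m]? = some '*'
      · have hml : m < l.length := by
          by_contra hn; rw [List.getElem?_eq_none (by omega)] at hstar; simp at hstar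
        rw [if_pos (by rw [PySem.List.pyGet?_natCast]; exact hstar)]
        have hm1 : ((m : Int) - 1) = ((m - 1 : Nat) : Int) := by omega
        have hget : PySem.List.pyGet? (markPre m l) ((m : Int) - 1)
            = some ((markPre m l)[m - 1]'(by omega)) := by
          rw [hm1, PySem.List.pyGet?_natCast, List.getElem?_eq_getElem (by omega)]
        rw [hget]
        dsimp only
        have hval : (markPre m l)[m - 1]'(by omega) = l[m - 1]'(by omega) := by
          unfold markPre
          rw [List.getElem_mapIdx]
          rw [if_neg (by omega)]
        rw [hval, hm1, PySem.List.pySetD_natCast]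
        apply List.ext_getElem
        · simp [markPre]
        · intro j hj hj2
          rw [List.getElem_set]
          unfold markPre
          rw [List.getElem_mapIdx, List.getElem_mapIdx]
          by_cases hjm : m - 1 = j
          · subst hjm
            rw [if_pos rfl, if_pos ⟨by omega, by rw [show m - 1 + 1 = m by omega]; exact hstar⟩]
          · rw [if_neg hjm]
            by_cases hc : j + 1 < m ∧ l[j + 1]? = some '*'
            · rw [if_pos hc, if_pos ⟨by omega, hc.2⟩]
            · rw [if_neg hc, if_neg (by
                rintro ⟨h1, h2⟩
                exact hc ⟨by omega, h2⟩)]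
      · rw [if_neg (by rw [PySem.List.pyGet?_natCast]; simpa using hstar)]
        unfold markPre
        apply mapIdx_congr'
        intro i hi
        have hiff : (i + 1 < m + 1 ∧ l[i + 1]? = some '*') ↔ (i + 1 < m ∧ l[i + 1]? = some '*') := by
          constructor
          · rintro ⟨h1, h2⟩
            refine ⟨?_, h2⟩
            rcases Nat.lt_succ_iff_lt_or_eq.mp h1 with h | h
            · exact h
            · exact absurd (h ▸ h2) hstar
          · rintro ⟨h1, h2⟩; exact ⟨by omega, h2⟩
        exact if_congr hiff.symm rfl rfl

-- A's second loop: removing '*' count-many times is filtering the stars out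
theorem filter_erase_star (l : List Char) :
    (l.erase '*').filter (· ≠ '*') = l.filter (· ≠ '*') := by
  induction l with
  | nil => simp
  | cons h t ih =>
    by_cases hh : h = '*'
    · subst hh; simp
    · rw [List.erase_cons_tail (by simpa using hh)]
      simp only [List.filter_cons]
      split_ifs with hd
      · rw [List.cons_inj_right]
        simpa using ih
      · simpa using ih

theorem count_erase_star (l : List Char) (h : '*' ∈ l) :
    (l.erase '*').count '*' = l.count '*' - 1 := by
  simp [List.count_erase_self]

theorem iterate_remove_eq_filter (l : List Char) :
    ∀ (k : Nat), l.count '*' ≤ k →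
      (PySem.List.pyRange 0 (k : Int) 1).foldl
        (fun acc _ => (PySem.List.remove? acc '*').getD acc) l
        = l.filter (· ≠ '*') := by
  have hlen : ∀ k : Nat, (PySem.List.pyRange 0 (k : Int) 1).length = k := by
    intro k; rw [PySem.List.length_pyRange_one]; omega
  intro k
  induction k generalizing l with
  | zero =>
    intro hc
    rw [List.foldl_const, hlen 0, Function.iterate_zero, id]
    symm
    rw [List.filter_eq_self]
    intro a ha
    simp only [ne_eq, decide_eq_true_eq]
    intro he; subst he
    exact (List.count_eq_zero.mp (Nat.le_zero.mp hc)) ha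
  | succ m ih =>
    intro hc
    rw [List.foldl_const, hlen (m + 1), Function.iterate_succ_apply]
    by_cases hmem : '*' ∈ l
    · simp only [PySem.List.remove?_eq_some_erase l '*' hmem, Option.getD_some]
      have := ih (l.erase '*') (by rw [count_erase_star l hmem]; omega)
      rw [List.foldl_const, hlen m] at this
      rw [this]
      exact filter_erase_star l
    · simp only [(PySem.List.remove?_eq_none_iff l '*').mpr hmem, Option.getD_none]
      have := ih l (by simp [List.count_eq_zero_of_not_mem hmem])
      rw [List.foldl_const, hlen m] at this
      simpa using this

theorem markIdx_nil : markIdx [] = [] := by simp [markIdx]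

theorem markIdx_cons (c : Char) (t : List Char) :
    markIdx (c :: t) = (if t[0]? = some '*' then PySem.Chars.upperChar c else c) :: markIdx t := by
  unfold markIdx
  rw [List.mapIdx_cons]
  rw [show (c :: t)[0 + 1]? = t[0]? from List.getElem?_cons_succ]
  congr 1

-- marking does not change where the stars are
theorem count_markIdx (l : List Char) : (markIdx l).count '*' = l.count '*' := by
  induction l with
  | nil => rw [markIdx_nil]
  | cons c t ih =>
    rw [markIdx_cons]
    by_cases hc : c = '*'
    · subst hc
      have hm : (if t[0]? = some '*' then PySem.Chars.upperChar '*' else '*') = '*' := by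
        split <;> simp [upperChar_star]
      rw [hm, List.count_cons_self, List.count_cons_self, ih]
    · have hm : (if t[0]? = some '*' then PySem.Chars.upperChar c else c) ≠ '*' := by
        split
        · exact upperChar_ne_star hc
        · exact hc
      rw [List.count_cons_of_ne hm, List.count_cons_of_ne hc, ih]

-- pySplitChar facts
theorem pySplitChar_ne_nil (sep : Char) (l : List Char) : pySplitChar sep l ≠ [] := by
  cases l with
  | nil => simp [pySplitChar]
  | cons c t =>
    unfold pySplitChar
    rcases h : pySplitChar sep t with _ | ⟨s, rest⟩ <;> simp
    split <;> simp

theorem pySplitChar_cons_sep (sep : Char) (t : List Char) :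
    pySplitChar sep (sep :: t) = [] :: pySplitChar sep t := by
  rcases h : pySplitChar sep t with _ | ⟨s, rest⟩
  · exact absurd h (pySplitChar_ne_nil sep t)
  · rw [pySplitChar, h]
    simp

theorem pySplitChar_cons_ne (sep c : Char) (t : List Char) (h : c ≠ sep)
    {s : List Char} {rest : List (List Char)} (ht : pySplitChar sep t = s :: rest) :
    pySplitChar sep (c :: t) = (c :: s) :: rest := by
  rw [pySplitChar, ht]
  simp [h]

-- reading the head of a split back on the original list
theorem pySplitChar_head_shape (sep : Char) (t : List Char) {s : List Char}
    {rest : List (List Char)} (h : pySplitChar sep t = s :: rest) :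
    (s = [] ∧ rest = [] ∧ t = []) ∨
    (∃ t', t = sep :: t' ∧ s = [] ∧ pySplitChar sep t' = rest) ∨
    (∃ a s' t', t = a :: t' ∧ a ≠ sep ∧ s = a :: s' ∧ pySplitChar sep t' = s' :: rest) := by
  cases t with
  | nil =>
    left
    simp [pySplitChar] at h
    exact ⟨h.1, h.2, rfl⟩
  | cons a t' =>
    by_cases ha : a = sep
    · subst ha
      right; left
      rw [pySplitChar_cons_sep] at h
      cases h
      exact ⟨t', rfl, rfl, rfl⟩
    · right; right
      rcases h' : pySplitChar sep t' with _ | ⟨s', rest'⟩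
      · exact absurd h' (pySplitChar_ne_nil sep t')
      · rw [pySplitChar_cons_ne sep a t' ha h'] at h
        cases h
        exact ⟨a, s', t', rfl, ha, rfl, h'⟩

theorem procSeg_nil : procSeg [] = [] := by simp [procSeg]

theorem procSeg_singleton (c : Char) : procSeg [c] = [PySem.Chars.upperChar c] := by
  simp [procSeg]

theorem procSeg_cons_cons (c a : Char) (s : List Char) :
    procSeg (c :: a :: s) = c :: procSeg (a :: s) := by
  unfold procSeg
  rw [List.getLast?_cons_cons]
  rcases h : (a :: s).getLast? with _ | x
  · simp at h
  · simp [List.dropLast_cons₂]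

theorem joinSegs_cons₂ (s r : List Char) (rs : List (List Char)) :
    joinSegs (s :: r :: rs) = procSeg s ++ joinSegs (r :: rs) := rfl

-- B computes filter (≠ '*') of the marked list
theorem joinSegs_split_eq (l : List Char) :
    joinSegs (pySplitChar '*' l) = (markIdx l).filter (· ≠ '*') := by
  induction l with
  | nil => simp [pySplitChar, joinSegs, markIdx_nil]
  | cons c t ih =>
    rcases h : pySplitChar '*' t with _ | ⟨s, rest⟩
    · exact absurd h (pySplitChar_ne_nil '*' t)
    rw [markIdx_cons]
    by_cases hc : c = '*'
    · subst hc
      rw [pySplitChar_cons_sep, h, joinSegs_cons₂, procSeg_nil, List.nil_append, ← h, ih]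
      have hm : (if t[0]? = some '*' then PySem.Chars.upperChar '*' else '*') = '*' := by
        split <;> simp [upperChar_star]
      rw [hm, List.filter_cons_of_neg (by simp)]
    · rw [pySplitChar_cons_ne '*' c t hc h]
      have hm : (if t[0]? = some '*' then PySem.Chars.upperChar c else c) ≠ '*' := by
        split
        · exact upperChar_ne_star hc
        · exact hc
      rw [List.filter_cons_of_pos (by simpa using hm)]
      rcases pySplitChar_head_shape '*' t h with ⟨hs, hr, htn⟩ | ⟨t', ht, hs, hrest⟩ | ⟨a, s', t', ht, ha, hs, ht'⟩
      · subst hs; subst hr; subst htn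
        simp [joinSegs, markIdx_nil]
      · subst hs; subst ht
        rcases hrr : rest with _ | ⟨r, rs⟩
        · exact absurd (hrr ▸ hrest) (pySplitChar_ne_nil '*' t')
        subst hrr
        rw [joinSegs_cons₂, procSeg_singleton]
        have hm2 : (if ('*' :: t')[0]? = some '*' then PySem.Chars.upperChar c else c)
            = PySem.Chars.upperChar c := by simp
        rw [hm2]
        have : joinSegs (pySplitChar '*' ('*' :: t')) = joinSegs (r :: rs) := by
          rw [pySplitChar_cons_sep, hrest, joinSegs_cons₂, procSeg_nil, List.nil_append]
        rw [← this, ih]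
        simp
      · subst hs; subst ht
        have hm2 : (if (a :: t')[0]? = some '*' then PySem.Chars.upperChar c else c) = c := by
          simp [ha]
        rw [hm2]
        rcases hrr : rest with _ | ⟨r, rs⟩
        · subst hrr
          have hj : joinSegs [c :: a :: s'] = c :: a :: s' := rfl
          have hj2 : joinSegs (pySplitChar '*' (a :: t')) = a :: s' := by rw [h]; rfl
          rw [hj2] at ih
          rw [hj, ← ih]
        · subst hrr
          rw [joinSegs_cons₂, procSeg_cons_cons, List.cons_append]
          have : joinSegs (pySplitChar '*' (a :: t')) = procSeg (a :: s') ++ joinSegs (r :: rs) := by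
            rw [h, joinSegs_cons₂]
          rw [← this, ih]

-- A in closed chars form
theorem convert_eq_chars (s : String) :
    convert s = String.ofList ((markIdx s.toList).filter (· ≠ '*')) := by
  unfold convert
  dsimp only
  rw [count_star_eq, fold1_eq_markPre s.toList s.toList.length le_rfl, markPre_length,
    iterate_remove_eq_filter (markIdx s.toList) (s.toList.count '*') (by rw [count_markIdx])]

-- ===== VERDICT (by name: the statement is the Claim_ definition above) =====
theorem convert_spec : Claim_equal_convert := by
  intro s _
  unfold Spec_convert convert_alt
  rw [convert_eq_chars, joinSegs_split_eq]
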